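-- pv_equiv track=rewrite | github.com/Mimicicax/EcoDrive | scripts/uwu.py | consumeEscaped
-- ===== SOURCE A (Python) =====
-- whitespaces = "\n\t "
--
-- hexDigits = "0123456789abcdefABCDEF"
--
-- def consumeEscaped(content, ptr):
-- 	escaped = "\\"
--
-- 	if content[ptr] in hexDigits:
-- 		count = 0
--
-- 		while ptr < len(content) and count < 5 and content[ptr] in hexDigits:
-- 			escaped	+= content[ptr]
-- 			ptr += 1
-- 			count += 1
--
-- 		if ptr != len(content) and content[ptr] in whitespaces:
-- 			ptr += 1
--
-- 	else:
-- 		escaped	+= content[ptr]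
-- 		ptr += 1
--
-- 	return (ptr, escaped)
-- ===== SOURCE B (Python) =====
-- hexDigits = "0123456789abcdefABCDEF"
-- whitespaces = "\n\t "
--
-- def consumeEscaped(content, ptr):
-- 	c = content[ptr]
-- 	if c not in hexDigits:
-- 		return (ptr + 1, "\\" + c)
-- 	tail = content[ptr:]
-- 	k = min(5, len(tail) - len(tail.lstrip(hexDigits)))
-- 	end = ptr + k
-- 	if end < len(content) and content[end] in whitespaces:
-- 		end += 1
-- 	return (end, "\\" + tail[:k])
-- ===== Notes on version B (the rewrite author's own statement) =====
-- stated objective: idiomatic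
-- what changed: A's while loop that mutates ptr, count and escaped together is replaced by a loop-free computation: str.lstrip(hexDigits) strips the entire unbounded hex run, the run length is clamped with min(...,5), and the result pointer and escaped text are obtained by arithmetic and one slice.
-- outside the precondition, e.g. on consumeEscaped('ab3', -1): A returns (3, '\\3ab3'), B returns (0, '\\3')
import Mathlib
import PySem

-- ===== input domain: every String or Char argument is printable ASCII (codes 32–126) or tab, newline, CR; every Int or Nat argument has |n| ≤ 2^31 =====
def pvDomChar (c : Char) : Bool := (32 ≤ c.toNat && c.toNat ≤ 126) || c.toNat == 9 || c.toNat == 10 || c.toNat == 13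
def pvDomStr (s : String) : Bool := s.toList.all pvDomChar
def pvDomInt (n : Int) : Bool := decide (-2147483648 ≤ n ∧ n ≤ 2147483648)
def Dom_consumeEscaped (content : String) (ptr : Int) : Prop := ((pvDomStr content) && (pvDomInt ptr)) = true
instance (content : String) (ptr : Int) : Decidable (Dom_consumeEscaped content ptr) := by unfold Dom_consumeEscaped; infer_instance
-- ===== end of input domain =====

-- B replaces A's three-variable while loop (ptr/count/escaped mutated together) by a loop-free
-- computation: strip the whole hex run with lstrip(hexDigits), clamp its length with min(.,5),
-- and derive the new pointer and escaped text by arithmetic and one slice (objective: idiomatic).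

def pvHexDigits : List Char := "0123456789abcdefABCDEF".toList
def pvWhitespaces : List Char := "\n\t ".toList

-- ===== PORT A =====
-- A's while loop: 'while ptr < len(content) and count < 5 and content[ptr] in hexDigits'.
-- fuel = 5 - count (count < 5 ↔ fuel > 0; checked before content[ptr], as in Python's short circuit).
def consumeEscapedLoopA (l : List Char) : Nat → Int → List Char → Int × List Char
  | 0, ptr, esc => (ptr, esc)
  | fuel + 1, ptr, esc =>
    if ptr < (l.length : Int) then
      match PySem.List.pyGet? l ptr with
      | some c =>
        if pvHexDigits.contains c then
          consumeEscapedLoopA l fuel (ptr + 1) (esc ++ [c])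
        else (ptr, esc)
      | none => (ptr, esc)   -- unreachable when 0 ≤ ptr < len
    else (ptr, esc)

def consumeEscaped (content : String) (ptr : Int) : Int × String :=
  let l := content.toList
  match PySem.List.pyGet? l ptr with
  | none => (ptr, "\\")     -- content[ptr] raises IndexError in Python; excluded by Pre_
  | some c =>
    if pvHexDigits.contains c then
      let r := consumeEscapedLoopA l 5 ptr ['\\']
      let p :=
        if r.1 ≠ (l.length : Int) ∧
            (PySem.List.pyGet? l r.1).any (fun w => pvWhitespaces.contains w) then r.1 + 1
        else r.1
      (p, String.ofList r.2)
    else (ptr + 1, String.ofList ['\\', c])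

-- ===== PORT B =====
def consumeEscaped_alt (content : String) (ptr : Int) : Int × String :=
  let l := content.toList
  match PySem.List.pyGet? l ptr with
  | none => (ptr, "\\")     -- content[ptr] raises IndexError in Python; excluded by Pre_
  | some c =>
    if ¬ pvHexDigits.contains c then (ptr + 1, String.ofList ['\\', c])
    else
      let tail := PySem.List.slice l (some ptr) none          -- content[ptr:]
      -- tail.lstrip(hexDigits): hand port, exact — Python's str.lstrip(chars) removes exactly
      -- the longest prefix of characters belonging to chars, i.e. dropWhile membership.
      let stripped := tail.dropWhile (pvHexDigits.contains ·)
      let k := min 5 (tail.length - stripped.length)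
      let e := ptr + (k : Int)
      let e' :=
        if e < (l.length : Int) ∧
            (PySem.List.pyGet? l e).any (fun w => pvWhitespaces.contains w) then e + 1
        else e
      (e', String.ofList ('\\' :: tail.take k))

-- ===== PRECONDITION & SPEC =====
-- Pre_ restricts ptr to the natural cursor domain 0 ≤ ptr < len(content): ptr = len(content) raises
-- IndexError, and a negative ptr is outside a parser cursor's natural domain — A's values there are
-- an accident of Python's negative-index wraparound.
def Pre_consumeEscaped (content : String) (ptr : Int) : Prop :=
  0 ≤ ptr ∧ ptr < (content.toList.length : Int)
instance (content : String) (ptr : Int) : Decidable (Pre_consumeEscaped content ptr) := by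
  unfold Pre_consumeEscaped; infer_instance

def pvWitness_consumeEscaped : String × Int := ("a1b2 x", 0)

def Spec_consumeEscaped (content : String) (ptr : Int) (out : Int × String) : Prop := out = consumeEscaped_alt content ptr
instance (content : String) (ptr : Int) (out : Int × String) : Decidable (Spec_consumeEscaped content ptr out) := by unfold Spec_consumeEscaped; infer_instance

-- ===== CLAIM =====
def Claim_equal_consumeEscaped : Prop := ∀ (content : String) (ptr : Int), Dom_consumeEscaped content ptr → Pre_consumeEscaped content ptr → Spec_consumeEscaped content ptr (consumeEscaped content ptr)

-- ===== LEMMAS AND PROOFS =====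

-- A's while loop consumes min fuel k hex chars, where k is the length of the hex prefix at n
theorem pv_loopA_spec (l : List Char) (f : Nat) : ∀ (n : Nat) (esc : List Char),
    consumeEscapedLoopA l f (n : Int) esc =
      (((n + min f ((l.drop n).takeWhile (pvHexDigits.contains ·)).length : Nat) : Int),
        esc ++ (l.drop n).take (min f ((l.drop n).takeWhile (pvHexDigits.contains ·)).length)) := by
  induction f with
  | zero => intro n esc; simp [consumeEscapedLoopA]
  | succ f ih =>
    intro n esc
    by_cases hn : n < l.length
    · have hdrop : l.drop n = l[n] :: l.drop (n + 1) := List.drop_eq_getElem_cons hn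
      have hget : PySem.List.pyGet? l (n : Int) = some l[n] := by
        simp [hn]
      by_cases hhex : l[n] ∈ pvHexDigits
      · have hcast : ((n : Int) + 1) = ((n + 1 : Nat) : Int) := by push_cast; ring
        simp only [consumeEscapedLoopA, hget, hcast, ih (n + 1), List.contains_eq_mem, hhex,
          decide_true, if_true]
        rw [if_pos (show ((n : Int) < (l.length : Int)) by exact_mod_cast hn), hdrop]
        simp only [List.takeWhile_cons, hhex, decide_true, if_true, List.length_cons,
          Nat.succ_min_succ, List.take_succ_cons, Prod.mk.injEq]
        refine ⟨by push_cast; omega, by simp⟩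
      · have h0 : (List.drop n l).takeWhile (fun x => decide (x ∈ pvHexDigits)) = [] := by
          rw [hdrop]; simp [hhex]
        simp [consumeEscapedLoopA, hhex, h0, List.getElem?_eq_getElem hn,
          show (n : Int) < (l.length : Int) from by exact_mod_cast hn]
    · have h1 : ¬ ((n : Int) < (l.length : Int)) := by exact_mod_cast hn
      simp [consumeEscapedLoopA, h1, List.drop_eq_nil_of_le (Nat.le_of_not_lt hn)]

-- length of what lstrip removed = length of the takeWhile prefix
theorem pv_lstrip_len (xs : List Char) :
    xs.length - (xs.dropWhile (fun x => decide (x ∈ pvHexDigits))).length =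
      (xs.takeWhile (fun x => decide (x ∈ pvHexDigits))).length := by
  have h := congrArg List.length (List.takeWhile_append_dropWhile
    (p := (fun x => decide (x ∈ pvHexDigits))) (l := xs))
  simp only [List.length_append] at h
  omega

-- ===== VERDICT =====
theorem consumeEscaped_spec : Claim_equal_consumeEscaped := by
  intro content ptr hdom hpre
  unfold Spec_consumeEscaped
  obtain ⟨h0, hlt⟩ := hpre
  obtain ⟨n, rfl⟩ : ∃ n : Nat, ptr = (n : Int) := ⟨ptr.toNat, (Int.toNat_of_nonneg h0).symm⟩
  have hn : n < content.toList.length := by exact_mod_cast hlt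
  have hget : PySem.List.pyGet? content.toList (n : Int) = some content.toList[n] := by
    simp [List.getElem?_eq_getElem hn]
  by_cases hhex : content.toList[n] ∈ pvHexDigits
  · have htail := PySem.List.slice_from_natCast content.toList n
    simp only [consumeEscaped, consumeEscaped_alt, hget, hhex, List.contains_eq_mem, decide_true,
      if_true, not_true_eq_false, if_false, pv_loopA_spec, htail]
    rw [pv_lstrip_len]
    have h1 : (List.takeWhile (fun x => decide (x ∈ pvHexDigits)) (List.drop n content.toList)).length ≤
        (List.drop n content.toList).length := (List.takeWhile_sublist _).length_le
    have h2 : (List.drop n content.toList).length = content.toList.length - n :=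
      List.length_drop
    generalize hM : min 5
        (List.takeWhile (fun x => decide (x ∈ pvHexDigits)) (List.drop n content.toList)).length = m
    have hm5 : m ≤ 5 := by omega
    have hlen : n + m ≤ content.toList.length := by omega
    have hne : ((↑(n + m) : Int) ≠ (content.toList.length : Int)) ↔
        ((↑n + ↑m : Int) < (content.toList.length : Int)) := by push_cast; omega
    push_cast at hne ⊢
    simp only [hne, List.singleton_append]
  · simp [consumeEscaped, consumeEscaped_alt, hget, hhex]
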